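-- pv_equiv track=rewrite | github.com/parth2024/show-case-blogs | blog/management/commands/migrate_article_styles.py | add_text_colors_and_highlights
-- ===== SOURCE A (Python) =====
-- def add_text_colors_and_highlights(content):
--     """
--     Convert any existing color styling to use the new classes
--     """
--     # Map old color styles to new classes
--     color_mapping = {
--         'color: #111827': 'class="text-primary"',
--         'color: #6b7280': 'class="text-secondary"',
--         'color: #2563eb': 'class="text-accent"',
--         'color: #059669': 'class="text-success"',
--         'color: #d97706': 'class="text-warning"',
--         'color: #dc2626': 'class="text-danger"',
--     }
--
--     for old_style, new_class in color_mapping.items():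
--         content = content.replace(f'style="{old_style}"', new_class)
--         content = content.replace(f"style='{old_style}'", new_class)
--
--     # Map background colors to highlight classes
--     highlight_mapping = {
--         'background-color: #fef3c7': 'class="highlight-yellow"',
--         'background-color: #dbeafe': 'class="highlight-blue"',
--         'background-color: #d1fae5': 'class="highlight-green"',
--         'background-color: #fecaca': 'class="highlight-red"',
--         'background-color: #e5e7eb': 'class="highlight-gray"',
--     }
--
--     for old_style, new_class in highlight_mapping.items():
--         content = content.replace(f'style="{old_style}"', new_class)
--         content = content.replace(f"style='{old_style}'", new_class)
--
--     return content
-- ===== SOURCE B (Python) =====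
-- def add_text_colors_and_highlights(content):
--     """
--     Convert any existing color styling to use the new classes
--     """
--     # one table: every exact styled-span literal -> its replacement class
--     mapping = {}
--     for old_style, new_class in [
--         ('color: #111827', 'class="text-primary"'),
--         ('color: #6b7280', 'class="text-secondary"'),
--         ('color: #2563eb', 'class="text-accent"'),
--         ('color: #059669', 'class="text-success"'),
--         ('color: #d97706', 'class="text-warning"'),
--         ('color: #dc2626', 'class="text-danger"'),
--         ('background-color: #fef3c7', 'class="highlight-yellow"'),
--         ('background-color: #dbeafe', 'class="highlight-blue"'),
--         ('background-color: #d1fae5', 'class="highlight-green"'),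
--         ('background-color: #fecaca', 'class="highlight-red"'),
--         ('background-color: #e5e7eb', 'class="highlight-gray"'),
--     ]:
--         mapping['style="%s"' % old_style] = new_class
--         mapping["style='%s'" % old_style] = new_class
--
--     # single left-to-right scan; every target literal starts with 's'
--     out = []
--     i = 0
--     n = len(content)
--     while i < n:
--         matched = None
--         if content[i] == 's':
--             for key, new_class in mapping.items():
--                 if content.startswith(key, i):
--                     matched = (key, new_class)
--                     break
--         if matched is None:
--             out.append(content[i])
--             i += 1
--         else:
--             out.append(matched[1])
--             i += len(matched[0])
--     return ''.join(out)
-- ===== Notes on version B (the rewrite author's own statement) =====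
-- stated objective: alternative
-- what changed: Instead of 22 separate full-string .replace() passes (one per quote variant of each of the 11 styled-span literals), B builds one key->class table once and makes a single left-to-right scan over the content, matching a table key at each candidate position and copying everything else through unchanged; in pure Python the 22 C-implemented replace passes are nevertheless faster, so no speed is claimed.
import Mathlib
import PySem

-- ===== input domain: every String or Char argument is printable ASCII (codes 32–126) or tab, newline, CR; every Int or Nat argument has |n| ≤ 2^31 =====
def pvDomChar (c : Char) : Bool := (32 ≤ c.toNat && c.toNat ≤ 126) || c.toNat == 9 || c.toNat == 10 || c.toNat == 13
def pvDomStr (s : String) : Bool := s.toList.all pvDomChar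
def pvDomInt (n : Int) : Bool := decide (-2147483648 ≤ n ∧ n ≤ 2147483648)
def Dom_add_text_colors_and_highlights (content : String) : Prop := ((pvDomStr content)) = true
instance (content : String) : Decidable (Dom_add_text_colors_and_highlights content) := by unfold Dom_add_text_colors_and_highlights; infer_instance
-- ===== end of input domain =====

-- B replaces A's 22 sequential full-string .replace passes by one table-driven left-to-right scan; return values proved equal on all inputs.

-- ===== PORT A =====
-- literal transliteration of A: two ordered mapping lists, and for each entry two
-- .replace passes (double-quoted then single-quoted form) over the whole string
def add_text_colors_and_highlights (content : String) : String :=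
  let color_mapping : List (String × String) := [
    ("color: #111827", "class=\"text-primary\""),
    ("color: #6b7280", "class=\"text-secondary\""),
    ("color: #2563eb", "class=\"text-accent\""),
    ("color: #059669", "class=\"text-success\""),
    ("color: #d97706", "class=\"text-warning\""),
    ("color: #dc2626", "class=\"text-danger\"")
  ]
  let content := color_mapping.foldl (fun content p =>
    let content := PySem.Str.replace content ("style=\"" ++ p.1 ++ "\"") p.2
    PySem.Str.replace content ("style='" ++ p.1 ++ "'") p.2) content
  let highlight_mapping : List (String × String) := [
    ("background-color: #fef3c7", "class=\"highlight-yellow\""),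
    ("background-color: #dbeafe", "class=\"highlight-blue\""),
    ("background-color: #d1fae5", "class=\"highlight-green\""),
    ("background-color: #fecaca", "class=\"highlight-red\""),
    ("background-color: #e5e7eb", "class=\"highlight-gray\"")
  ]
  highlight_mapping.foldl (fun content p =>
    let content := PySem.Str.replace content ("style=\"" ++ p.1 ++ "\"") p.2
    PySem.Str.replace content ("style='" ++ p.1 ++ "'") p.2) content

-- ===== PORT B =====
-- Source B's base list of (old_style, new_class) pairs
def pvPairs : List (String × String) := [
    ("color: #111827", "class=\"text-primary\""),
    ("color: #6b7280", "class=\"text-secondary\""),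
    ("color: #2563eb", "class=\"text-accent\""),
    ("color: #059669", "class=\"text-success\""),
    ("color: #d97706", "class=\"text-warning\""),
    ("color: #dc2626", "class=\"text-danger\""),
    ("background-color: #fef3c7", "class=\"highlight-yellow\""),
    ("background-color: #dbeafe", "class=\"highlight-blue\""),
    ("background-color: #d1fae5", "class=\"highlight-green\""),
    ("background-color: #fecaca", "class=\"highlight-red\""),
    ("background-color: #e5e7eb", "class=\"highlight-gray\"")
  ]

-- Source B's `mapping` dict: keys in insertion order (double-quoted form, then single-quoted form)
def pvTbl : List (List Char × List Char) :=
  pvPairs.flatMap (fun p =>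
    [(("style=\"" ++ p.1 ++ "\"").toList, p.2.toList),
     (("style='" ++ p.1 ++ "'").toList, p.2.toList)])

-- Source B's inner `for key, new_class in mapping.items(): if content.startswith(key, i)`
def tryTable : List (List Char × List Char) → List Char → Option (List Char × List Char)
  | [], _ => none
  | kv :: rest, s => if kv.1.isPrefixOf s then some kv else tryTable rest s

-- the two lemmas the scan's termination argument cites
theorem tryTable_mem {L : List (List Char × List Char)} {s : List Char} {kv : List Char × List Char}
    (h : tryTable L s = some kv) : kv ∈ L := by
  induction L with
  | nil => simp [tryTable] at h
  | cons p rest ih =>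
    rw [tryTable] at h
    split at h
    · cases h; exact List.mem_cons_self
    · exact List.mem_cons_of_mem _ (ih h)

theorem pvTbl_key_ne_nil : ∀ p ∈ pvTbl, p.1 ≠ [] := by decide

-- Source B's while-loop over the content: copy a char, or emit the class and skip the key
def scan : List Char → List Char
  | [] => []
  | c :: t =>
    if c = 's' then
      match h : tryTable pvTbl (c :: t) with
      | some kv => kv.2 ++ scan (List.drop kv.1.length (c :: t))
      | none => c :: scan t
    else c :: scan t
termination_by s => s.length
decreasing_by
  · have hm := tryTable_mem h
    have hk := List.length_pos_of_ne_nil (pvTbl_key_ne_nil _ hm)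
    simp only [List.length_drop, List.length_cons]
    omega
  · simp
  · simp

def add_text_colors_and_highlights_alt (content : String) : String :=
  String.ofList (scan content.toList)

-- ===== PRECONDITION & SPEC =====
def Spec_add_text_colors_and_highlights (content : String) (out : String) : Prop := out = add_text_colors_and_highlights_alt content
instance (content : String) (out : String) : Decidable (Spec_add_text_colors_and_highlights content out) := by unfold Spec_add_text_colors_and_highlights; infer_instance

-- ===== CLAIM (what is proved, stated in full; the proofs are below) =====
def Claim_equal_add_text_colors_and_highlights : Prop := ∀ (content : String), Dom_add_text_colors_and_highlights content → Spec_add_text_colors_and_highlights content (add_text_colors_and_highlights content)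

-- ===== LEMMAS AND PROOFS =====

-- the table, written out (proved equal to pvTbl below)
def pvTblE : List (List Char × List Char) := [
  (['s', 't', 'y', 'l', 'e', '=', '"', 'c', 'o', 'l', 'o', 'r', ':', ' ', '#', '1', '1', '1', '8', '2', '7', '"'],
   ['c', 'l', 'a', 's', 's', '=', '"', 't', 'e', 'x', 't', '-', 'p', 'r', 'i', 'm', 'a', 'r', 'y', '"']),
  (['s', 't', 'y', 'l', 'e', '=', '\'', 'c', 'o', 'l', 'o', 'r', ':', ' ', '#', '1', '1', '1', '8', '2', '7', '\''],
   ['c', 'l', 'a', 's', 's', '=', '"', 't', 'e', 'x', 't', '-', 'p', 'r', 'i', 'm', 'a', 'r', 'y', '"']),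
  (['s', 't', 'y', 'l', 'e', '=', '"', 'c', 'o', 'l', 'o', 'r', ':', ' ', '#', '6', 'b', '7', '2', '8', '0', '"'],
   ['c', 'l', 'a', 's', 's', '=', '"', 't', 'e', 'x', 't', '-', 's', 'e', 'c', 'o', 'n', 'd', 'a', 'r', 'y', '"']),
  (['s', 't', 'y', 'l', 'e', '=', '\'', 'c', 'o', 'l', 'o', 'r', ':', ' ', '#', '6', 'b', '7', '2', '8', '0', '\''],
   ['c', 'l', 'a', 's', 's', '=', '"', 't', 'e', 'x', 't', '-', 's', 'e', 'c', 'o', 'n', 'd', 'a', 'r', 'y', '"']),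
  (['s', 't', 'y', 'l', 'e', '=', '"', 'c', 'o', 'l', 'o', 'r', ':', ' ', '#', '2', '5', '6', '3', 'e', 'b', '"'],
   ['c', 'l', 'a', 's', 's', '=', '"', 't', 'e', 'x', 't', '-', 'a', 'c', 'c', 'e', 'n', 't', '"']),
  (['s', 't', 'y', 'l', 'e', '=', '\'', 'c', 'o', 'l', 'o', 'r', ':', ' ', '#', '2', '5', '6', '3', 'e', 'b', '\''],
   ['c', 'l', 'a', 's', 's', '=', '"', 't', 'e', 'x', 't', '-', 'a', 'c', 'c', 'e', 'n', 't', '"']),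
  (['s', 't', 'y', 'l', 'e', '=', '"', 'c', 'o', 'l', 'o', 'r', ':', ' ', '#', '0', '5', '9', '6', '6', '9', '"'],
   ['c', 'l', 'a', 's', 's', '=', '"', 't', 'e', 'x', 't', '-', 's', 'u', 'c', 'c', 'e', 's', 's', '"']),
  (['s', 't', 'y', 'l', 'e', '=', '\'', 'c', 'o', 'l', 'o', 'r', ':', ' ', '#', '0', '5', '9', '6', '6', '9', '\''],
   ['c', 'l', 'a', 's', 's', '=', '"', 't', 'e', 'x', 't', '-', 's', 'u', 'c', 'c', 'e', 's', 's', '"']),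
  (['s', 't', 'y', 'l', 'e', '=', '"', 'c', 'o', 'l', 'o', 'r', ':', ' ', '#', 'd', '9', '7', '7', '0', '6', '"'],
   ['c', 'l', 'a', 's', 's', '=', '"', 't', 'e', 'x', 't', '-', 'w', 'a', 'r', 'n', 'i', 'n', 'g', '"']),
  (['s', 't', 'y', 'l', 'e', '=', '\'', 'c', 'o', 'l', 'o', 'r', ':', ' ', '#', 'd', '9', '7', '7', '0', '6', '\''],
   ['c', 'l', 'a', 's', 's', '=', '"', 't', 'e', 'x', 't', '-', 'w', 'a', 'r', 'n', 'i', 'n', 'g', '"']),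
  (['s', 't', 'y', 'l', 'e', '=', '"', 'c', 'o', 'l', 'o', 'r', ':', ' ', '#', 'd', 'c', '2', '6', '2', '6', '"'],
   ['c', 'l', 'a', 's', 's', '=', '"', 't', 'e', 'x', 't', '-', 'd', 'a', 'n', 'g', 'e', 'r', '"']),
  (['s', 't', 'y', 'l', 'e', '=', '\'', 'c', 'o', 'l', 'o', 'r', ':', ' ', '#', 'd', 'c', '2', '6', '2', '6', '\''],
   ['c', 'l', 'a', 's', 's', '=', '"', 't', 'e', 'x', 't', '-', 'd', 'a', 'n', 'g', 'e', 'r', '"']),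
  (['s', 't', 'y', 'l', 'e', '=', '"', 'b', 'a', 'c', 'k', 'g', 'r', 'o', 'u', 'n', 'd', '-', 'c', 'o', 'l', 'o', 'r', ':', ' ', '#', 'f', 'e', 'f', '3', 'c', '7', '"'],
   ['c', 'l', 'a', 's', 's', '=', '"', 'h', 'i', 'g', 'h', 'l', 'i', 'g', 'h', 't', '-', 'y', 'e', 'l', 'l', 'o', 'w', '"']),
  (['s', 't', 'y', 'l', 'e', '=', '\'', 'b', 'a', 'c', 'k', 'g', 'r', 'o', 'u', 'n', 'd', '-', 'c', 'o', 'l', 'o', 'r', ':', ' ', '#', 'f', 'e', 'f', '3', 'c', '7', '\''],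
   ['c', 'l', 'a', 's', 's', '=', '"', 'h', 'i', 'g', 'h', 'l', 'i', 'g', 'h', 't', '-', 'y', 'e', 'l', 'l', 'o', 'w', '"']),
  (['s', 't', 'y', 'l', 'e', '=', '"', 'b', 'a', 'c', 'k', 'g', 'r', 'o', 'u', 'n', 'd', '-', 'c', 'o', 'l', 'o', 'r', ':', ' ', '#', 'd', 'b', 'e', 'a', 'f', 'e', '"'],
   ['c', 'l', 'a', 's', 's', '=', '"', 'h', 'i', 'g', 'h', 'l', 'i', 'g', 'h', 't', '-', 'b', 'l', 'u', 'e', '"']),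
  (['s', 't', 'y', 'l', 'e', '=', '\'', 'b', 'a', 'c', 'k', 'g', 'r', 'o', 'u', 'n', 'd', '-', 'c', 'o', 'l', 'o', 'r', ':', ' ', '#', 'd', 'b', 'e', 'a', 'f', 'e', '\''],
   ['c', 'l', 'a', 's', 's', '=', '"', 'h', 'i', 'g', 'h', 'l', 'i', 'g', 'h', 't', '-', 'b', 'l', 'u', 'e', '"']),
  (['s', 't', 'y', 'l', 'e', '=', '"', 'b', 'a', 'c', 'k', 'g', 'r', 'o', 'u', 'n', 'd', '-', 'c', 'o', 'l', 'o', 'r', ':', ' ', '#', 'd', '1', 'f', 'a', 'e', '5', '"'],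
   ['c', 'l', 'a', 's', 's', '=', '"', 'h', 'i', 'g', 'h', 'l', 'i', 'g', 'h', 't', '-', 'g', 'r', 'e', 'e', 'n', '"']),
  (['s', 't', 'y', 'l', 'e', '=', '\'', 'b', 'a', 'c', 'k', 'g', 'r', 'o', 'u', 'n', 'd', '-', 'c', 'o', 'l', 'o', 'r', ':', ' ', '#', 'd', '1', 'f', 'a', 'e', '5', '\''],
   ['c', 'l', 'a', 's', 's', '=', '"', 'h', 'i', 'g', 'h', 'l', 'i', 'g', 'h', 't', '-', 'g', 'r', 'e', 'e', 'n', '"']),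
  (['s', 't', 'y', 'l', 'e', '=', '"', 'b', 'a', 'c', 'k', 'g', 'r', 'o', 'u', 'n', 'd', '-', 'c', 'o', 'l', 'o', 'r', ':', ' ', '#', 'f', 'e', 'c', 'a', 'c', 'a', '"'],
   ['c', 'l', 'a', 's', 's', '=', '"', 'h', 'i', 'g', 'h', 'l', 'i', 'g', 'h', 't', '-', 'r', 'e', 'd', '"']),
  (['s', 't', 'y', 'l', 'e', '=', '\'', 'b', 'a', 'c', 'k', 'g', 'r', 'o', 'u', 'n', 'd', '-', 'c', 'o', 'l', 'o', 'r', ':', ' ', '#', 'f', 'e', 'c', 'a', 'c', 'a', '\''],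
   ['c', 'l', 'a', 's', 's', '=', '"', 'h', 'i', 'g', 'h', 'l', 'i', 'g', 'h', 't', '-', 'r', 'e', 'd', '"']),
  (['s', 't', 'y', 'l', 'e', '=', '"', 'b', 'a', 'c', 'k', 'g', 'r', 'o', 'u', 'n', 'd', '-', 'c', 'o', 'l', 'o', 'r', ':', ' ', '#', 'e', '5', 'e', '7', 'e', 'b', '"'],
   ['c', 'l', 'a', 's', 's', '=', '"', 'h', 'i', 'g', 'h', 'l', 'i', 'g', 'h', 't', '-', 'g', 'r', 'a', 'y', '"']),
  (['s', 't', 'y', 'l', 'e', '=', '\'', 'b', 'a', 'c', 'k', 'g', 'r', 'o', 'u', 'n', 'd', '-', 'c', 'o', 'l', 'o', 'r', ':', ' ', '#', 'e', '5', 'e', '7', 'e', 'b', '\''],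
   ['c', 'l', 'a', 's', 's', '=', '"', 'h', 'i', 'g', 'h', 'l', 'i', 'g', 'h', 't', '-', 'g', 'r', 'a', 'y', '"'])
]


def noPre (a b : List Char) : Bool := !(a.isPrefixOf b) && !(b.isPrefixOf a)

theorem pvTbl_eq : pvTbl = pvTblE := by decide

-- decided facts about the fixed table ------------------------------------------------
-- F1/F2/F4: keys are nonempty, start with 's', and contain 's' only at position 0
theorem fKeyB : (pvTblE.all fun p => !p.1.isEmpty && (p.1.head? == some 's') && (p.1.drop 1).all (· != 's')) = true := by decide
-- F3: two distinct keys are never prefix-comparable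
theorem fDistB : (pvTblE.all fun p => pvTblE.all fun q => (p.1 == q.1) || noPre p.1 q.1) = true := by decide
-- F5: no proper key suffix is prefix-comparable with any value
theorem fKVB : (pvTblE.all fun p => pvTblE.all fun q =>
    (List.range p.1.length).all fun j => j == 0 || noPre (p.1.drop j) q.2) = true := by decide
-- F6: no key is prefix-comparable with any value suffix
theorem fVKB : (pvTblE.all fun p => pvTblE.all fun q =>
    (List.range q.2.length).all fun j => noPre p.1 (q.2.drop j)) = true := by decide
-- F7: the keys are pairwise distinct
theorem fNodup : (pvTblE.map (·.1)).Nodup := by decide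

theorem noPre_iff {a b : List Char} : noPre a b = true ↔ ¬ a <+: b ∧ ¬ b <+: a := by
  constructor
  · intro h
    simp only [noPre, Bool.and_eq_true, Bool.not_eq_true'] at h
    constructor
    · intro hp; rw [← List.isPrefixOf_iff_prefix] at hp; rw [h.1] at hp; cases hp
    · intro hp; rw [← List.isPrefixOf_iff_prefix] at hp; rw [h.2] at hp; cases hp
  · intro h
    simp only [noPre, Bool.and_eq_true, Bool.not_eq_true']
    constructor
    · rw [← Bool.not_eq_true, List.isPrefixOf_iff_prefix]; exact h.1
    · rw [← Bool.not_eq_true, List.isPrefixOf_iff_prefix]; exact h.2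

-- Prop forms
theorem fKey : ∀ p ∈ pvTblE, p.1 ≠ [] ∧ p.1.head? = some 's' ∧ ∀ c ∈ p.1.drop 1, c ≠ 's' := by
  have h := fKeyB
  rw [List.all_eq_true] at h
  intro p hp
  have h2 := h p hp
  simp only [Bool.and_eq_true, Bool.not_eq_true', List.isEmpty_eq_false_iff, beq_iff_eq,
    List.all_eq_true, bne_iff_ne] at h2
  exact ⟨h2.1.1, h2.1.2, h2.2⟩
theorem fDist : ∀ p ∈ pvTblE, ∀ q ∈ pvTblE, p.1 ≠ q.1 → ¬ p.1 <+: q.1 ∧ ¬ q.1 <+: p.1 := by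
  have h := fDistB
  rw [List.all_eq_true] at h
  intro p hp q hq hne
  have h2 := h p hp
  rw [List.all_eq_true] at h2
  have h3 := h2 q hq
  simp only [Bool.or_eq_true, beq_iff_eq] at h3
  rcases h3 with h3 | h3
  · exact absurd h3 hne
  · exact noPre_iff.1 h3
theorem fKV : ∀ p ∈ pvTblE, ∀ q ∈ pvTblE, ∀ j, 1 ≤ j → j < p.1.length →
    ¬ (p.1.drop j) <+: q.2 ∧ ¬ q.2 <+: (p.1.drop j) := by
  have h := fKVB
  rw [List.all_eq_true] at h
  intro p hp q hq j h1 h2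
  have h3 := h p hp
  rw [List.all_eq_true] at h3
  have h4 := h3 q hq
  rw [List.all_eq_true] at h4
  have h5 := h4 j (List.mem_range.2 h2)
  simp only [Bool.or_eq_true, beq_iff_eq] at h5
  rcases h5 with h5 | h5
  · omega
  · exact noPre_iff.1 h5
theorem fVK : ∀ p ∈ pvTblE, ∀ q ∈ pvTblE, ∀ j, j < q.2.length →
    ¬ p.1 <+: (q.2.drop j) ∧ ¬ (q.2.drop j) <+: p.1 := by
  have h := fVKB
  rw [List.all_eq_true] at h
  intro p hp q hq j hj
  have h3 := h p hp
  rw [List.all_eq_true] at h3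
  have h4 := h3 q hq
  rw [List.all_eq_true] at h4
  exact noPre_iff.1 (h4 j (List.mem_range.2 hj))

-- a recursion-friendly model of Python str.replace (for nonempty `old`) ----------------
def repl (old new : List Char) (s : List Char) : List Char :=
  match s with
  | [] => []
  | c :: t =>
    if h : old ≠ [] ∧ old <+: (c :: t) then
      new ++ repl old new (List.drop old.length (c :: t))
    else c :: repl old new t
termination_by s.length
decreasing_by
  · have := List.length_pos_of_ne_nil h.1
    simp only [List.length_drop, List.length_cons]
    omega
  · simp

theorem repl_nil {old new : List Char} : repl old new [] = [] := by rw [repl]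

theorem repl_pos {old new : List Char} {c : Char} {t : List Char}
    (h : old ≠ []) (hp : old <+: (c :: t)) :
    repl old new (c :: t) = new ++ repl old new (List.drop old.length (c :: t)) := by
  rw [repl]; simp [h, hp]

theorem repl_neg {old new : List Char} {c : Char} {t : List Char} (hp : ¬ old <+: (c :: t)) :
    repl old new (c :: t) = c :: repl old new t := by
  rw [repl]; simp [hp]

theorem go_eq {old new : List Char} (h : old ≠ []) :
    ∀ fuel l acc, l.length ≤ fuel →
      PySem.Chars.replace.go old new fuel l acc = acc.reverse ++ repl old new l := by
  intro fuel
  induction fuel with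
  | zero =>
    intro l acc hl
    have hnil : l = [] := by cases l <;> simp_all
    subst hnil
    rw [PySem.Chars.replace.go, repl_nil]
  | succ n ih =>
    intro l acc hl
    cases l with
    | nil =>
      rw [PySem.Chars.replace.go, repl_nil]
      · simp
      · omega
    | cons c t =>
      rw [PySem.Chars.replace.go]
      by_cases hp : old <+: (c :: t)
      · have hb : old.isPrefixOf (c :: t) = true := List.isPrefixOf_iff_prefix.2 hp
        have hlen := List.length_pos_of_ne_nil h
        rw [if_pos hb, ih _ _ (by simp only [List.length_drop, List.length_cons] at *; omega),
          repl_pos h hp]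
        simp
      · have hb : old.isPrefixOf (c :: t) = false := by
          rw [← Bool.not_eq_true, List.isPrefixOf_iff_prefix]; exact hp
        rw [if_neg (by simp [hb]), ih t (c :: acc) (by simp at hl ⊢; omega), repl_neg hp]
        simp

theorem replace_eq {s old new : List Char} (h : old ≠ []) :
    PySem.Chars.replace s old new = repl old new s := by
  rw [PySem.Chars.replace]
  rw [if_neg (by simp [h])]
  have h2 := go_eq (old := old) (new := new) h s.length s [] le_rfl
  simpa using h2

theorem str_replace_toList {s old new : String} (h : old.toList ≠ []) :
    (PySem.Str.replace s old new).toList = repl old.toList new.toList s.toList := by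
  rw [PySem.Str.toList_replace, replace_eq h]

-- the A-side composition of replaces
def chain (L : List (List Char × List Char)) (s : List Char) : List Char :=
  L.foldl (fun s p => repl p.1 p.2 s) s

theorem chain_nil_str : ∀ L, chain L [] = [] := by
  intro L
  induction L with
  | nil => rfl
  | cons p L' ih => simp only [chain, List.foldl_cons, repl_nil] at *; exact ih

-- the two literal key shapes A builds are nonempty
theorem key_dq_ne (x y : String) : ("style=\"" ++ x ++ y).toList ≠ [] := by
  intro hc
  rw [String.toList_append, String.toList_append] at hc
  have : ("style=\"" : String).toList = [] := by
    cases h2 : ("style=\"" : String).toList with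
    | nil => rfl
    | cons a l => rw [h2] at hc; simp at hc
  simp at this

theorem key_sq_ne (x y : String) : ("style='" ++ x ++ y).toList ≠ [] := by
  intro hc
  rw [String.toList_append, String.toList_append] at hc
  have : ("style='" : String).toList = [] := by
    cases h2 : ("style='" : String).toList with
    | nil => rfl
    | cons a l => rw [h2] at hc; simp at hc
  simp at this

theorem str_repl_dq (s x y new : String) :
    (PySem.Str.replace s ("style=\"" ++ x ++ y) new).toList
      = repl ("style=\"" ++ x ++ y).toList new.toList s.toList :=
  str_replace_toList (key_dq_ne x y)

theorem str_repl_sq (s x y new : String) :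
    (PySem.Str.replace s ("style='" ++ x ++ y) new).toList
      = repl ("style='" ++ x ++ y).toList new.toList s.toList :=
  str_replace_toList (key_sq_ne x y)

theorem portA_toList (content : String) :
    (add_text_colors_and_highlights content).toList = chain pvTbl content.toList := by
  simp only [add_text_colors_and_highlights, chain, pvTbl, pvPairs, List.flatMap_cons,
    List.flatMap_nil, List.foldl_cons, List.foldl_nil, List.append_nil, List.cons_append,
    List.nil_append, str_repl_dq, str_repl_sq]

-- structural lemmas ------------------------------------------------------------------
theorem prefix_append_cases {α : Type} {k w X : List α} (h : k <+: w ++ X) : k <+: w ∨ w <+: k := by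
  by_cases hl : k.length ≤ w.length
  · exact Or.inl (List.prefix_of_prefix_length_le h (by simpa using List.prefix_append w X) hl)
  · exact Or.inr (List.prefix_of_prefix_length_le (by simpa using List.prefix_append w X) h (by omega))

-- stepping a replace over a span no key can match inside
theorem skipw {k v : List Char} (hk : k ≠ []) :
    ∀ w X, (∀ p, p < w.length → ¬ (k <+: w.drop p) ∧ ¬ (w.drop p <+: k)) →
      repl k v (w ++ X) = w ++ repl k v X := by
  intro w
  induction w with
  | nil => intro X h; simp
  | cons c w' ih =>
    intro X h
    have h0 := h 0 (by simp)
    simp only [List.drop_zero] at h0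
    have hnp : ¬ k <+: c :: (w' ++ X) := by
      intro hp
      rw [← List.cons_append] at hp
      rcases prefix_append_cases hp with h1 | h1
      · exact h0.1 h1
      · exact h0.2 h1
    rw [List.cons_append, repl_neg hnp,
      ih X (fun p hp => by simpa [List.drop_succ_cons] using h (p + 1) (by simp; omega))]
    simp

theorem skipw_chain {w : List Char} :
    ∀ L : List (List Char × List Char),
      (∀ p ∈ L, p.1 ≠ [] ∧ ∀ q, q < w.length → ¬ (p.1 <+: w.drop q) ∧ ¬ (w.drop q <+: p.1)) →
      ∀ X, chain L (w ++ X) = w ++ chain L X := by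
  intro L
  induction L with
  | nil => intro _ X; simp [chain]
  | cons p L' ih =>
    intro h X
    have hp := h p List.mem_cons_self
    show chain L' (repl p.1 p.2 (w ++ X)) = w ++ chain L' (repl p.1 p.2 X)
    rw [skipw hp.1 w X hp.2]
    exact ih (fun q hq => h q (List.mem_cons_of_mem _ hq)) (repl p.1 p.2 X)

-- a replace cannot create a key occurrence at the head
theorem noCreate {k kk v : List Char} (hkk : kk ≠ [])
    (NC : ∀ j, 1 ≤ j → j < k.length → ¬ (k.drop j <+: v) ∧ ¬ (v <+: k.drop j)) :
    ∀ n u j, u.length ≤ n → 1 ≤ j → ¬ (k.drop j <+: u) → ¬ (k.drop j <+: repl kk v u) := by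
  intro n
  induction n with
  | zero =>
    intro u j hu _ hnp hp
    have hnil : u = [] := by cases u <;> simp_all
    subst hnil
    rw [repl_nil] at hp
    exact hnp (by rw [List.prefix_nil.1 hp])
  | succ n ih =>
    intro u j hu h1 hnp hp
    by_cases hj : j < k.length
    · cases u with
      | nil =>
        rw [repl_nil] at hp
        exact hnp (by rw [List.prefix_nil.1 hp])
      | cons c t =>
        by_cases hkkp : kk <+: (c :: t)
        · rw [repl_pos hkk hkkp] at hp
          rcases prefix_append_cases hp with h2 | h2
          · exact (NC j h1 hj).1 h2
          · exact (NC j h1 hj).2 h2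
        · rw [repl_neg hkkp] at hp
          have hdj := List.drop_eq_getElem_cons hj
          rw [hdj, List.cons_prefix_cons] at hp
          obtain ⟨hc, hp'⟩ := hp
          have hnp' : ¬ k.drop (j + 1) <+: t := by
            intro hx
            exact hnp (by rw [hdj, hc]; exact List.cons_prefix_cons.2 ⟨rfl, hx⟩)
          exact ih t (j + 1) (by simp at hu; omega) (by omega) hnp' hp'
    · apply hnp
      rw [List.drop_eq_nil_of_le (by omega)]
      exact List.nil_prefix

-- case: some key matches at the head
-- lists with different head characters are never prefix-comparable
theorem head_ne_noPre {a b : List Char} {x y : Char} (ha : a.head? = some x) (hb : b.head? = some y)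
    (hxy : x ≠ y) : ¬ a <+: b ∧ ¬ b <+: a := by
  cases a with
  | nil => simp at ha
  | cons a0 a' =>
    cases b with
    | nil => simp at hb
    | cons b0 b' =>
      simp only [List.head?_cons, Option.some.injEq] at ha hb
      subst ha hb
      constructor
      · intro hp; exact hxy (List.cons_prefix_cons.1 hp).1
      · intro hp; exact hxy ((List.cons_prefix_cons.1 hp).1).symm

-- skipping condition over a key span, for an entry with a different key
theorem key_skip_cond {w : List Char} (hw1 : w ≠ []) (hw3 : ∀ c ∈ w.drop 1, c ≠ 's')
    {p : List Char × List Char} (hpE : p ∈ pvTblE) (hdist : ¬ p.1 <+: w ∧ ¬ w <+: p.1) :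
    ∀ q, q < w.length → ¬ (p.1 <+: w.drop q) ∧ ¬ (w.drop q <+: p.1) := by
  intro q hq
  rcases Nat.eq_zero_or_pos q with hq0 | hq1
  · subst hq0; simpa using hdist
  · have hhd : (w.drop q).head? = some w[q] := by
      rw [List.head?_drop]
      exact List.getElem?_eq_getElem hq
    have hwq : w[q] ≠ 's' := by
      apply hw3
      rw [List.mem_iff_getElem?]
      refine ⟨q - 1, ?_⟩
      rw [List.getElem?_drop, show 1 + (q - 1) = q by omega, List.getElem?_eq_getElem hq]
    have hps := (fKey p hpE).2.1
    exact head_ne_noPre hps hhd (fun hc => hwq hc.symm)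

-- consuming the matched key at the head of the string
theorem repl_self_append {k v : List Char} (hk : k ≠ []) :
    ∀ Y, repl k v (k ++ Y) = v ++ repl k v Y := by
  intro Y
  cases hkc : k with
  | nil => exact absurd hkc hk
  | cons c k' =>
    rw [List.cons_append, repl_pos (by simp) (by rw [← List.cons_append]; exact List.prefix_append _ _)]
    rw [← List.cons_append, ← hkc, List.drop_left]

theorem chain_match {kv : List Char × List Char} (hm : kv ∈ pvTblE) :
    ∀ X, chain pvTblE (kv.1 ++ X) = kv.2 ++ chain pvTblE X := by
  obtain ⟨L1, L2, hsplit⟩ := List.append_of_mem hm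
  have hK := fKey kv hm
  -- entries of L1 have keys different from kv.1
  have hnd := fNodup
  rw [hsplit, List.map_append, List.nodup_append] at hnd
  have hne1 : ∀ p ∈ L1, p.1 ≠ kv.1 := by
    intro p hp hc
    have hmm : p.1 ∈ List.map (fun x => x.1) L1 := List.mem_map_of_mem hp
    have hmm2 : p.1 ∈ List.map (fun x => x.1) (kv :: L2) := by rw [hc]; simp
    exact hnd.2.2 p.1 hmm p.1 hmm2 rfl
  intro X
  have hfold : ∀ Y, chain pvTblE Y = chain L2 (repl kv.1 kv.2 (chain L1 Y)) := by
    intro Y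
    rw [hsplit]
    simp only [chain, List.foldl_append, List.foldl_cons]
  rw [hfold (kv.1 ++ X), hfold X]
  -- step the L1 replaces over the key span
  rw [skipw_chain L1 (fun p hp => by
    have hpE : p ∈ pvTblE := by rw [hsplit]; exact List.mem_append_left _ hp
    refine ⟨(fKey p hpE).1, key_skip_cond hK.1 hK.2.2 hpE ?_⟩
    exact fDist p hpE kv hm (hne1 p hp)) X]
  -- consume the key
  rw [repl_self_append hK.1]
  -- step the L2 replaces over the emitted value
  rw [skipw_chain L2 (fun p hp => by
    have hpE : p ∈ pvTblE := by
      rw [hsplit]; exact List.mem_append_right _ (List.mem_cons_of_mem _ hp)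
    exact ⟨(fKey p hpE).1, fun q hq => fVK p hpE kv hm q hq⟩) (repl kv.1 kv.2 (chain L1 X))]

-- case: no key matches at the head
theorem chain_step {c : Char} :
    ∀ L : List (List Char × List Char), (∀ p ∈ L, p ∈ pvTblE) →
      ∀ u, (∀ p ∈ pvTblE, ¬ p.1 <+: c :: u) →
      chain L (c :: u) = c :: chain L u ∧ (∀ p ∈ pvTblE, ¬ p.1 <+: c :: chain L u) := by
  intro L
  induction L with
  | nil => intro _ u h; exact ⟨rfl, h⟩
  | cons p L' ih =>
    intro hL u h
    have hpE := hL p List.mem_cons_self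
    have hstep : repl p.1 p.2 (c :: u) = c :: repl p.1 p.2 u :=
      repl_neg (h p hpE)
    have hinv : ∀ q ∈ pvTblE, ¬ q.1 <+: c :: repl p.1 p.2 u := by
      intro q hqE hp2
      have hq1 := (fKey q hqE).1
      cases hq : q.1 with
      | nil => exact hq1 hq
      | cons q0 qt =>
        rw [hq, List.cons_prefix_cons] at hp2
        obtain ⟨hq0, hqt⟩ := hp2
        have hnpt : ¬ q.1.drop 1 <+: u := by
          intro hx
          apply h q hqE
          rw [hq, List.cons_prefix_cons]
          exact ⟨hq0, by rw [hq] at hx; simpa using hx⟩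
        have := noCreate (k := q.1) (fKey p hpE).1
          (fun j hj1 hj2 => fKV q hqE p hpE j hj1 hj2)
          u.length u 1 le_rfl le_rfl hnpt
        exact this (by rw [hq]; simpa using hqt)
    have := ih (fun q hq => hL q (List.mem_cons_of_mem _ hq)) (repl p.1 p.2 u) hinv
    constructor
    · show chain L' (repl p.1 p.2 (c :: u)) = c :: chain L' (repl p.1 p.2 u)
      rw [hstep]; exact this.1
    · exact this.2

-- tryTable characterisations
theorem tryTable_some {L : List (List Char × List Char)} {s : List Char} {kv : List Char × List Char}
    (h : tryTable L s = some kv) : kv ∈ L ∧ kv.1 <+: s := by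
  induction L with
  | nil => simp [tryTable] at h
  | cons p rest ih =>
    rw [tryTable] at h
    split at h
    · cases h
      exact ⟨List.mem_cons_self, List.isPrefixOf_iff_prefix.1 (by assumption)⟩
    · obtain ⟨h1, h2⟩ := ih h
      exact ⟨List.mem_cons_of_mem _ h1, h2⟩

theorem tryTable_none {L : List (List Char × List Char)} {s : List Char}
    (h : tryTable L s = none) : ∀ p ∈ L, ¬ p.1 <+: s := by
  induction L with
  | nil => simp
  | cons p rest ih =>
    rw [tryTable] at h
    split at h
    · cases h
    · intro q hq
      rcases List.mem_cons.1 hq with hq | hq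
      · subst hq
        intro hc
        simp only [← List.isPrefixOf_iff_prefix] at hc
        simp_all
      · exact ih h q hq

-- scan equations
theorem scan_nil : scan [] = [] := by rw [scan]

theorem scan_cons_some {c : Char} {t : List Char} {kv : List Char × List Char}
    (h : tryTable pvTbl (c :: t) = some kv) :
    scan (c :: t) = kv.2 ++ scan (List.drop kv.1.length (c :: t)) := by
  obtain ⟨hmem, hpre⟩ := tryTable_some h
  have hmemE : kv ∈ pvTblE := by rw [← pvTbl_eq]; exact hmem
  have hc : c = 's' := by
    have hhd := (fKey kv hmemE).2.1
    cases hk : kv.1 with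
    | nil => rw [hk] at hhd; simp at hhd
    | cons k0 kt =>
      rw [hk] at hpre hhd
      simp only [List.head?_cons, Option.some.injEq] at hhd
      have h0 := (List.cons_prefix_cons.1 hpre).1
      rw [← h0, hhd]
  subst hc
  rw [scan, if_pos rfl]
  split
  · next kv2 heq => rw [h] at heq; cases heq; rfl
  · next heq => rw [h] at heq; cases heq

theorem scan_cons_none {c : Char} {t : List Char}
    (h : tryTable pvTbl (c :: t) = none) :
    scan (c :: t) = c :: scan t := by
  rw [scan]
  by_cases hc : c = 's'
  · subst hc
    rw [if_pos rfl]
    split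
    · next kv2 heq => rw [h] at heq; cases heq
    · rfl
  · rw [if_neg hc]

-- main induction
theorem main_eq : ∀ n (s : List Char), s.length ≤ n → chain pvTblE s = scan s := by
  intro n
  induction n with
  | zero =>
    intro s hs
    have : s = [] := by cases s <;> simp_all
    subst this
    rw [scan_nil, chain_nil_str]
  | succ n ih =>
    intro s hs
    cases s with
    | nil => rw [scan_nil, chain_nil_str]
    | cons c t =>
      cases htt : tryTable pvTbl (c :: t) with
      | some kv =>
        obtain ⟨hmem, hpre⟩ := tryTable_some htt
        have hmemE : kv ∈ pvTblE := by rw [← pvTbl_eq]; exact hmem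
        obtain ⟨r, hr⟩ := hpre
        rw [scan_cons_some htt]
        have hdrop : List.drop kv.1.length (c :: t) = r := by rw [← hr, List.drop_left]
        rw [hdrop, ← hr, chain_match hmemE r]
        congr 1
        apply ih
        have hk1 := List.length_pos_of_ne_nil (fKey kv hmemE).1
        have hlen : kv.1.length + r.length = (c :: t).length := by
          rw [← hr, List.length_append]
        simp only [List.length_cons] at hlen hs
        omega
      | none =>
        rw [scan_cons_none htt]
        have hnp : ∀ p ∈ pvTblE, ¬ p.1 <+: c :: t := by
          intro p hp
          exact tryTable_none htt p (by rw [pvTbl_eq]; exact hp)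
        rw [(chain_step pvTblE (fun p hp => hp) t hnp).1,
          ih t (by simp at hs; omega)]

-- ===== VERDICT (by name: the statement is the Claim_ definition above) =====
theorem add_text_colors_and_highlights_spec : Claim_equal_add_text_colors_and_highlights := by
  intro content _
  unfold Spec_add_text_colors_and_highlights add_text_colors_and_highlights_alt
  have h1 : (add_text_colors_and_highlights content).toList = scan content.toList := by
    rw [portA_toList, pvTbl_eq, main_eq content.toList.length content.toList le_rfl]
  calc add_text_colors_and_highlights content
      = String.ofList (add_text_colors_and_highlights content).toList := by rw [String.ofList_toList]
    _ = String.ofList (scan content.toList) := by rw [h1]
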